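-- pv_equiv track=rewrite | github.com/stefangouldson/Wintersun-Nordic-Addon | extend_tracker.py | parse_elements
-- ===== SOURCE A (Python) =====
-- def parse_elements(lines, start):
--     """Parse list elements starting at `start`, returning (start, end) line ranges."""
--     elements = []
--     elem_indent = None
--     j = start
--     while j < len(lines):
--         line = lines[j]
--         stripped = line.lstrip()
--         indent = len(line) - len(stripped)
--
--         if stripped.startswith('- '):
--             if elem_indent is None:
--                 elem_indent = indent
--             if indent == elem_indent:
--                 # New element — find its extent
--                 k = j + 1
--                 while k < len(lines):
--                     sk = lines[k]
--                     sk_stripped = sk.lstrip()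
--                     sk_indent = len(sk) - len(sk_stripped)
--                     if sk_stripped == '' or sk_stripped == '\n':
--                         k += 1
--                     elif sk_stripped.startswith('- ') and sk_indent <= elem_indent:
--                         break
--                     elif sk_indent <= elem_indent:
--                         break
--                     else:
--                         k += 1
--                 elements.append((j, k))
--                 j = k
--             elif indent < elem_indent:
--                 break
--             else:
--                 j += 1
--         elif stripped == '' or stripped == '\n':
--             j += 1
--         elif elem_indent is not None and indent <= elem_indent:
--             break
--         else:
--             j += 1
--     return elements
-- ===== SOURCE B (Python) =====
-- def parse_elements(lines, start):
--     """Parse list elements starting at `start`, returning (start, end) line ranges."""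
--     elements = []
--     elem_indent = None
--     open_start = None
--     stop = None
--     n = len(lines)
--     for j in range(start, n):
--         line = lines[j]
--         stripped = line.lstrip()
--         indent = len(line) - len(stripped)
--         if stripped == '':
--             continue
--         if stripped.startswith('- '):
--             if elem_indent is None:
--                 elem_indent = indent
--             if indent == elem_indent:
--                 if open_start is not None:
--                     elements.append((open_start, j))
--                 open_start = j
--             elif indent < elem_indent:
--                 stop = j
--                 break
--             # deeper '- ' lines are continuations of the open element
--         elif elem_indent is not None and indent <= elem_indent:
--             stop = j
--             break
--     if open_start is not None:
--         elements.append((open_start, stop if stop is not None else n))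
--     return elements
-- ===== Notes on version B (the rewrite author's own statement) =====
-- stated objective: simpler
-- what changed: Replaces A's nested loops (outer scan plus an inner per-element extent scan whose boundary line is re-read and re-stripped by the outer loop after the j=k jump) by a single flat pass that classifies each line once, keeping one open-element start variable.
import Mathlib
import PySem

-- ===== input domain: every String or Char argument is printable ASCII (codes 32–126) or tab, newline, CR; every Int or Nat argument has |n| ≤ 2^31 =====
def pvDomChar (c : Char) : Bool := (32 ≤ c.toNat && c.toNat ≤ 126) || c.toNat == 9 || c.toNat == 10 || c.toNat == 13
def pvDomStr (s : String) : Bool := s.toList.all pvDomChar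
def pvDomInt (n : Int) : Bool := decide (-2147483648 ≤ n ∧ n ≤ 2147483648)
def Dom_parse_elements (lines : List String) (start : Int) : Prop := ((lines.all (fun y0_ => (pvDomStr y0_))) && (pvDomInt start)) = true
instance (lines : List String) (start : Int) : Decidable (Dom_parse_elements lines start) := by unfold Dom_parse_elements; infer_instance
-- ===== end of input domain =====

-- B replaces A's nested loops (inner extent scan + j=k jump) by one flat pass with an
-- open-element state variable; objective: simpler. Equal return value on Pre_ is proved below.


-- ===== PORT A =====
-- termination measure steps for the index loops (named so the proof terms inside the defs stay small)
theorem pv_dec_step (n j : Int) (h : j < n) : (n - (j + 1)).toNat < (n - j).toNat := by omega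
theorem pv_dec_jump (n j k : Int) (h : j < n) (hk : j + 1 ≤ k) : (n - k).toNat < (n - j).toNat := by
  omega
-- A's inner extent scan: `k = j + 1; while k < len(lines): …` — returns the final k.
def pvA_inner (lines : List String) (e : Int) (k : Int) : Int :=
  if h : k < (lines.length : Int) then
    match PySem.List.pyGet? lines k with
    | none => k  -- Python raises IndexError here; excluded by Pre_
    | some sk =>
      let skStripped := PySem.Str.lstrip sk
      let skIndent := PySem.Str.len sk - PySem.Str.len skStripped
      if skStripped = "" ∨ skStripped = "\n" then pvA_inner lines e (k + 1)
      else if PySem.Str.startswith skStripped "- " ∧ skIndent ≤ e then k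
      else if skIndent ≤ e then k
      else pvA_inner lines e (k + 1)
  else k
termination_by ((lines.length : Int) - k).toNat
decreasing_by all_goals exact pv_dec_step _ _ h

-- needed by pvA_outer's termination proof (the `j = k` jump moves forward)
theorem pvA_inner_ge (lines : List String) (e : Int) (k : Int) : k ≤ pvA_inner lines e k := by
  fun_induction pvA_inner lines e k <;> omega

-- A's outer while loop: state (elements, elem_indent, j).
def pvA_outer (lines : List String) (elems : List (Int × Int)) (eo : Option Int) (j : Int) :
    List (Int × Int) :=
  if h : j < (lines.length : Int) then
    match PySem.List.pyGet? lines j with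
    | none => elems  -- Python raises IndexError here; excluded by Pre_
    | some line =>
      let stripped := PySem.Str.lstrip line
      let indent := PySem.Str.len line - PySem.Str.len stripped
      if PySem.Str.startswith stripped "- " then
        let e := eo.getD indent        -- `if elem_indent is None: elem_indent = indent`
        if indent = e then
          let k := pvA_inner lines e (j + 1)
          pvA_outer lines (elems ++ [(j, k)]) (some e) k
        else if indent < e then elems
        else pvA_outer lines elems (some e) (j + 1)
      else if stripped = "" ∨ stripped = "\n" then pvA_outer lines elems eo (j + 1)
      else
        match eo with
        | some e => if indent ≤ e then elems else pvA_outer lines elems eo (j + 1)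
        | none => pvA_outer lines elems eo (j + 1)
  else elems
termination_by ((lines.length : Int) - j).toNat
decreasing_by
  all_goals first
    | exact pv_dec_step _ _ h
    | exact pv_dec_jump _ _ _ h (pvA_inner_ge lines (eo.getD (PySem.Str.len line - PySem.Str.len (PySem.Str.lstrip line))) (j + 1))

def parse_elements (lines : List String) (start : Int) : List (Int × Int) :=
  pvA_outer lines [] none start

-- ===== PORT B =====
-- close the currently open element (if any) at line `stop`
def pvB_close (elems : List (Int × Int)) (openStart : Option Int) (stop : Int) :
    List (Int × Int) :=
  match openStart with
  | none => elems
  | some s => elems ++ [(s, stop)]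

-- B's single flat pass: state (elem_indent, open element start, elements).
def pvB_loop (lines : List String) (eo : Option Int) (op : Option Int)
    (elems : List (Int × Int)) (j : Int) : List (Int × Int) :=
  if h : j < (lines.length : Int) then
    match PySem.List.pyGet? lines j with
    | none => elems  -- Python raises IndexError here; excluded by Pre_
    | some line =>
      let stripped := PySem.Str.lstrip line
      let indent := PySem.Str.len line - PySem.Str.len stripped
      if stripped = "" then pvB_loop lines eo op elems (j + 1)
      else if PySem.Str.startswith stripped "- " then
        let e := eo.getD indent
        if indent = e then pvB_loop lines (some e) (some j) (pvB_close elems op j) (j + 1)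
        else if indent < e then pvB_close elems op j          -- stop = j; break
        else pvB_loop lines eo op elems (j + 1)               -- deeper '- ': continuation
      else
        match eo with
        | some e => if indent ≤ e then pvB_close elems op j else pvB_loop lines eo op elems (j + 1)
        | none => pvB_loop lines eo op elems (j + 1)
  else pvB_close elems op (lines.length : Int)
termination_by ((lines.length : Int) - j).toNat
decreasing_by all_goals exact pv_dec_step _ _ h

def parse_elements_alt (lines : List String) (start : Int) : List (Int × Int) :=
  pvB_loop lines none none [] start

-- ===== PRECONDITION & SPEC =====
-- Pre_ excludes exactly the inputs where Python A raises IndexError: start < -len(lines)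
-- (the loop condition j < len holds for negative j, and lines[j] then raises).
def Pre_parse_elements (lines : List String) (start : Int) : Prop :=
  -(lines.length : Int) ≤ start
instance (lines : List String) (start : Int) : Decidable (Pre_parse_elements lines start) := by
  unfold Pre_parse_elements; infer_instance
def pvWitness_parse_elements : List String × Int := (["- a", "  b", "- c"], 0)

def Spec_parse_elements (lines : List String) (start : Int) (out : List (Int × Int)) : Prop :=
  out = parse_elements_alt lines start
instance (lines : List String) (start : Int) (out : List (Int × Int)) :
    Decidable (Spec_parse_elements lines start out) := by unfold Spec_parse_elements; infer_instance

-- ===== CLAIM (what is proved, stated in full; the proofs are below) =====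
def Claim_equal_parse_elements : Prop := ∀ (lines : List String) (start : Int), Dom_parse_elements lines start → Pre_parse_elements lines start → Spec_parse_elements lines start (parse_elements lines start)

-- ===== LEMMAS AND PROOFS =====

theorem pv_lstrip_ne_newline (s : String) : PySem.Str.lstrip s ≠ "\n" := by
  intro h
  have h2 : (PySem.Str.lstrip s).toList = ['\n'] := by rw [h]; rfl
  rw [PySem.Str.toList_lstrip] at h2
  unfold PySem.Chars.lstrip at h2
  have h3 := List.head?_dropWhile_not (p := PySem.Chars.isspace) (l := s.toList)
  rw [h2] at h3
  simp at h3
  exact absurd h3 (by decide)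

theorem pv_term (lines : List String) (j : Int) (hj : ¬ j < (lines.length : Int)) :
    (∀ elems, pvA_outer lines elems none j = pvB_loop lines none none elems j) ∧
    (j ≤ (lines.length : Int) → ∀ e s elems,
      pvB_loop lines (some e) (some s) elems j =
        pvA_outer lines (elems ++ [(s, pvA_inner lines e j)]) (some e) (pvA_inner lines e j)) := by
  constructor
  · intro elems
    rw [pvA_outer, pvB_loop]
    simp [hj, pvB_close]
  · intro hle e s elems
    have hje : j = (lines.length : Int) := by omega
    subst hje
    rw [pvA_inner]
    simp only [dif_neg hj]
    rw [pvA_outer, pvB_loop]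
    simp [hj, pvB_close]

theorem pv_main (lines : List String) (m : Nat) :
    ∀ j : Int, ((lines.length : Int) - j).toNat ≤ m → -(lines.length : Int) ≤ j →
      (∀ elems, pvA_outer lines elems none j = pvB_loop lines none none elems j) ∧
      (j ≤ (lines.length : Int) → ∀ e s elems,
        pvB_loop lines (some e) (some s) elems j =
          pvA_outer lines (elems ++ [(s, pvA_inner lines e j)]) (some e) (pvA_inner lines e j)) := by
  induction m with
  | zero =>
    intro j hm _
    exact pv_term lines j (by omega)
  | succ m ih =>
    intro j hm hlow
    by_cases hj : j < (lines.length : Int)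
    case neg => exact pv_term lines j hj
    case pos =>
    obtain ⟨line, hline⟩ : ∃ l, PySem.List.pyGet? lines j = some l := by
      cases hg : PySem.List.pyGet? lines j with
      | some l => exact ⟨l, rfl⟩
      | none =>
        rw [PySem.List.pyGet?_eq_none_iff] at hg
        exact absurd (by constructor <;> omega : PySem.Raise.InRange lines.length j) hg
    have hnl := pv_lstrip_ne_newline line
    have ihn := ih (j + 1) (by omega) (by omega)
    constructor
    · intro elems
      rw [pvA_outer, pvB_loop]
      simp only [dif_pos hj, hline, Option.getD]
      by_cases hst : PySem.Str.lstrip line = ""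
      · rw [hst]
        simp only [show PySem.Str.startswith "" "- " = false from by decide,
          Bool.false_eq_true, if_false, eq_self_iff_true, true_or, if_true]
        exact ihn.1 elems
      · have hbd : ¬(PySem.Str.lstrip line = "" ∨ PySem.Str.lstrip line = "\n") := by
          rintro (h | h); exacts [hst h, hnl h]
        by_cases hsw : PySem.Str.startswith (PySem.Str.lstrip line) "- " = true
        · rw [if_neg hst, if_pos hsw, if_pos hsw]
          simp only [eq_self_iff_true, if_true, pvB_close, List.nil_append]
          exact (ihn.2 (by omega) _ j elems).symm
        · rw [if_neg hst, if_neg hsw, if_neg hsw, if_neg hbd]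
          exact ihn.1 elems
    · intro hle e s elems
      rw [pvA_inner, pvB_loop]
      simp only [dif_pos hj, hline, Option.getD]
      by_cases hst : PySem.Str.lstrip line = ""
      · rw [hst]
        simp only [eq_self_iff_true, true_or, if_true]
        exact ihn.2 (by omega) e s elems
      · have hbd : ¬(PySem.Str.lstrip line = "" ∨ PySem.Str.lstrip line = "\n") := by
          rintro (h | h); exacts [hst h, hnl h]
        rw [if_neg hst, if_neg hbd]
        by_cases hsw : PySem.Str.startswith (PySem.Str.lstrip line) "- " = true
        · rw [if_pos hsw]
          by_cases hind : PySem.Str.len line - PySem.Str.len (PySem.Str.lstrip line) ≤ e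
          · rw [if_pos (And.intro hsw hind)]
            rw [pvA_outer]
            simp only [dif_pos hj, hline, Option.getD]
            rw [if_pos hsw]
            by_cases hie : PySem.Str.len line - PySem.Str.len (PySem.Str.lstrip line) = e
            · rw [if_pos hie, if_pos hie]
              simp only [pvB_close]
              exact ihn.2 (by omega) e j (elems ++ [(s, j)])
            · have hlt : PySem.Str.len line - PySem.Str.len (PySem.Str.lstrip line) < e := by omega
              rw [if_neg hie, if_neg hie, if_pos hlt, if_pos hlt]
              simp only [pvB_close]
          · have hc2 : ¬(PySem.Str.startswith (PySem.Str.lstrip line) "- " = true ∧ PySem.Str.len line - PySem.Str.len (PySem.Str.lstrip line) ≤ e) := fun h => hind h.2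
            have hc3 : ¬(PySem.Str.len line - PySem.Str.len (PySem.Str.lstrip line) = e) := fun h => hind (le_of_eq h)
            have hc4 : ¬(PySem.Str.len line - PySem.Str.len (PySem.Str.lstrip line) < e) := by omega
            rw [if_neg hc2, if_neg hind, if_neg hc3, if_neg hc4]
            exact ihn.2 (by omega) e s elems
        · have hc2 : ¬(PySem.Str.startswith (PySem.Str.lstrip line) "- " = true ∧ PySem.Str.len line - PySem.Str.len (PySem.Str.lstrip line) ≤ e) := fun h => hsw h.1
          rw [if_neg hsw, if_neg hc2]
          by_cases hind : PySem.Str.len line - PySem.Str.len (PySem.Str.lstrip line) ≤ e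
          · rw [if_pos hind, if_pos hind]
            rw [pvA_outer]
            simp only [dif_pos hj, hline, Option.getD]
            rw [if_neg hsw, if_neg hbd, if_pos hind]
            simp only [pvB_close]
          · rw [if_neg hind, if_neg hind]
            exact ihn.2 (by omega) e s elems

-- ===== VERDICT (by name: the statement is the Claim_ definition above) =====
theorem parse_elements_spec : Claim_equal_parse_elements := by
  intro lines start _ hpre
  unfold Spec_parse_elements parse_elements parse_elements_alt
  exact ((pv_main lines ((lines.length : Int) - start).toNat start le_rfl hpre).1 [])
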